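-- pv_equiv track=rewrite | github.com/ryushade/backendMoviles | services/solicitud_service.py | _split_by_reset
-- ===== SOURCE A (Python) =====
-- import itertools
-- from typing import Dict, List, Tuple
--
-- RESET_THRESHOLD: int = 5      # página ≤5 tras ≥8 → nuevo capítulo
--
-- MIN_PAGES_CHAP: int = 8
--
-- def _numeric_tokens(s: str):
--     tokens = []
--     for k, g in itertools.groupby(s, str.isdigit):
--         if k:
--             tokens.append(int("".join(g)))
--     return tokens
--
-- def _split_by_reset(names_sorted):
--     """Devuelve {chap_idx: [names]} usando la heurística de reset."""
--     chapters: Dict[int, List[str]] = {}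
--     current: List[str] = []
--     last_page: int | None = None
--     idx: int = 1
--
--     for fname in names_sorted:
--         nums = _numeric_tokens(fname)
--         page = nums[-1] if nums else None
--
--         if (
--             last_page is not None
--             and page is not None
--             and page <= RESET_THRESHOLD
--             and last_page >= RESET_THRESHOLD + 3
--         ):
--             if len(current) >= MIN_PAGES_CHAP:
--                 chapters[idx] = current
--                 idx += 1
--                 current = []
--         current.append(fname)
--         last_page = page
--     if current:
--         chapters[idx] = current
--     return chapters
-- ===== SOURCE B (Python) =====
-- RESET_THRESHOLD = 5      # page <=5 after >=8 -> new chapter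
-- MIN_PAGES_CHAP = 8
--
-- def _last_page(s):
--     # last maximal digit run of s, scanned from the end (no full tokenisation)
--     i = len(s)
--     while i > 0 and not s[i-1].isdigit():
--         i -= 1
--     j = i
--     while j > 0 and s[j-1].isdigit():
--         j -= 1
--     return int(s[j:i]) if i > j else None
--
-- def _split_by_reset(names_sorted):
--     pages = [_last_page(f) for f in names_sorted]
--     bounds = [0]
--     for i, (prev, page) in enumerate(zip(pages, pages[1:]), 1):
--         if (prev is not None and page is not None
--                 and page <= RESET_THRESHOLD
--                 and prev >= RESET_THRESHOLD + 3
--                 and i - bounds[-1] >= MIN_PAGES_CHAP):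
--             bounds.append(i)
--     bounds.append(len(names_sorted))
--     return {k: names_sorted[a:b]
--             for k, (a, b) in enumerate(zip(bounds, bounds[1:]), 1)
--             if a < b}
-- ===== Notes on version B (the rewrite author's own statement) =====
-- stated objective: alternative
-- what changed: B replaces A's single stateful pass (accumulating a current-chapter list, a dict and a running index) by a three-phase pipeline: precompute each name's last page by scanning the string from its end (instead of tokenising all numeric runs and taking the last), then compute chapter boundary indices from adjacent page pairs, then build the result by slicing the input between consecutive boundaries.
import Mathlib
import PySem

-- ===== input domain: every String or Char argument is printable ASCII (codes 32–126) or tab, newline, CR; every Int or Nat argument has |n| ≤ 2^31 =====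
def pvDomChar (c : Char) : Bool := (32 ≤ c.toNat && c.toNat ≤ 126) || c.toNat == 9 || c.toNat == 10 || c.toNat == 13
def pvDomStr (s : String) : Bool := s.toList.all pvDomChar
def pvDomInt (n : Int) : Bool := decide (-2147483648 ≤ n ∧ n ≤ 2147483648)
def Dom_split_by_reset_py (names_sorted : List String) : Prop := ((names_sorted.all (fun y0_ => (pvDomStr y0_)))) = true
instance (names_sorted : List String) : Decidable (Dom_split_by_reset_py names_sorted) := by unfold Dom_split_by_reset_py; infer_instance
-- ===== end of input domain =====

-- B rebuilds the same chapters via a pages/boundaries/slices pipeline instead of A's one stateful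
-- accumulating pass (objective: alternative decomposition, same cost).

def RESET_THRESHOLD : Int := 5
def MIN_PAGES_CHAP : Int := 8

-- int("".join(...)) / int(s[j:i]) on a run of ASCII digits (both programs only call it on such runs)
def pvVal (cs : List Char) : Int := (PySem.Int.ofChars? cs).getD 0

-- ===== PORT A =====
-- _numeric_tokens: itertools.groupby(s, str.isdigit) with the digit groups joined and int()ed,
-- transliterated as a left-to-right scan keeping the current digit run `cur` and emitted tokens `acc`
def pvTokensAux : List Char → List Char → List Int → List Int
  | [], cur, acc => if cur.isEmpty then acc else acc ++ [pvVal cur]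
  | c :: rest, cur, acc =>
    if PySem.Str.isdigit c then pvTokensAux rest (cur ++ [c]) acc
    else if cur.isEmpty then pvTokensAux rest [] acc
    else pvTokensAux rest [] (acc ++ [pvVal cur])

def pvTokens (s : String) : List Int := pvTokensAux s.toList [] []

def pvStepA (st : PySem.Dict Int (List String) × List String × Option Int × Int) (fname : String) :
    PySem.Dict Int (List String) × List String × Option Int × Int :=
  let nums := pvTokens fname
  let page : Option Int := if nums.isEmpty then none else PySem.List.pyGet? nums (-1)
  let (chapters, current, last_page, idx) := st
  let (chapters, current, idx) :=
    match last_page, page with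
    | some lp, some p =>
      if p ≤ RESET_THRESHOLD ∧ lp ≥ RESET_THRESHOLD + 3 then
        if (current.length : Int) ≥ MIN_PAGES_CHAP then
          (chapters.insert idx current, ([] : List String), idx + 1)
        else (chapters, current, idx)
      else (chapters, current, idx)
    | _, _ => (chapters, current, idx)
  (chapters, current ++ [fname], page, idx)

def split_by_reset_py (names_sorted : List String) : List (Int × List String) :=
  let st := names_sorted.foldl pvStepA (PySem.Dict.empty, [], none, 1)
  let (chapters, current, _, idx) := st
  (if current.isEmpty then chapters else chapters.insert idx current).items

-- ===== PORT B =====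
-- _last_page: the two index while-loops scan s from its end; ported as dropWhile/takeWhile on the
-- reversed character list (exactly the prefix those loops delimit)
def pvLastPage (s : String) : Option Int :=
  let run := (((s.toList.reverse).dropWhile (fun c => !(PySem.Str.isdigit c))).takeWhile
                (fun c => PySem.Str.isdigit c)).reverse
  if run.isEmpty then none else some (pvVal run)

def pvStepBounds (bs : List Int) (x : Int × Option Int × Option Int) : List Int :=
  match x.2.1, x.2.2 with
  | some prev, some page =>
    if page ≤ RESET_THRESHOLD ∧ prev ≥ RESET_THRESHOLD + 3 ∧
        x.1 - PySem.List.pyGetD bs (-1) 0 ≥ MIN_PAGES_CHAP then bs ++ [x.1] else bs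
  | _, _ => bs

def pvStepBuild (names : List String) (acc : List (Int × List String)) (x : Int × Int × Int) :
    List (Int × List String) :=
  if x.2.1 < x.2.2 then acc ++ [(x.1, PySem.List.slice names (some x.2.1) (some x.2.2))] else acc

def split_by_reset_py_alt (names_sorted : List String) : List (Int × List String) :=
  let pages := names_sorted.map pvLastPage
  let bounds := (PySem.List.enumerate (pages.zip (PySem.List.slice pages (some 1) none)) 1).foldl
      pvStepBounds [0]
  let bounds := bounds ++ [(names_sorted.length : Int)]
  (PySem.List.enumerate (bounds.zip (PySem.List.slice bounds (some 1) none)) 1).foldl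
      (pvStepBuild names_sorted) []

-- ===== PRECONDITION & SPEC =====
def Spec_split_by_reset_py (names_sorted : List String) (out : List (Int × List String)) : Prop := out = split_by_reset_py_alt names_sorted
instance (names_sorted : List String) (out : List (Int × List String)) : Decidable (Spec_split_by_reset_py names_sorted out) := by unfold Spec_split_by_reset_py; infer_instance

-- ===== CLAIM (what is proved, stated in full; the proofs are below) =====
def Claim_equal_split_by_reset_py : Prop := ∀ (names_sorted : List String), Dom_split_by_reset_py names_sorted → Spec_split_by_reset_py names_sorted (split_by_reset_py names_sorted)

-- ===== LEMMAS AND PROOFS =====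

-- ---- reference notions used only by the proofs ----

-- the last maximal digit run of a character list
def lastRun (l : List Char) : List Char :=
  ((l.reverse.dropWhile (fun c => !(PySem.Str.isdigit c))).takeWhile
     (fun c => PySem.Str.isdigit c)).reverse

-- chapter segments: the common shape both programs compute
def segs : List String → Option Int → List String → List (List String)
  | [], _, cur => if cur.isEmpty then [] else [cur]
  | f :: rest, lp, cur =>
    match lp, pvLastPage f with
    | some l, some p =>
      if p ≤ RESET_THRESHOLD ∧ l ≥ RESET_THRESHOLD + 3 then
        if (cur.length : Int) ≥ MIN_PAGES_CHAP then cur :: segs rest (pvLastPage f) [f]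
        else segs rest (pvLastPage f) (cur ++ [f])
      else segs rest (pvLastPage f) (cur ++ [f])
    | _, _ => segs rest (pvLastPage f) (cur ++ [f])

def segLens : List String → Option Int → Int → List Int
  | [], _, cl => [cl]
  | f :: rest, lp, cl =>
    match lp, pvLastPage f with
    | some l, some p =>
      if p ≤ RESET_THRESHOLD ∧ l ≥ RESET_THRESHOLD + 3 ∧ cl ≥ MIN_PAGES_CHAP then
        cl :: segLens rest (pvLastPage f) 1
      else segLens rest (pvLastPage f) (cl + 1)
    | _, _ => segLens rest (pvLastPage f) (cl + 1)

def newB : List String → Option Int → Int → Int → List Int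
  | [], _, _, _ => []
  | f :: rest, lp, i, b =>
    match lp, pvLastPage f with
    | some l, some p =>
      if p ≤ RESET_THRESHOLD ∧ l ≥ RESET_THRESHOLD + 3 ∧ i - b ≥ MIN_PAGES_CHAP then
        i :: newB rest (pvLastPage f) (i + 1) i
      else newB rest (pvLastPage f) (i + 1) b
    | _, _ => newB rest (pvLastPage f) (i + 1) b

def presums : Int → List Int → List Int
  | _, [] => []
  | b, l :: ls => (b + l) :: presums (b + l) ls

def numberFrom : Int → List (List String) → List (Int × List String)
  | _, [] => []
  | i, s :: ss => (i, s) :: numberFrom (i + 1) ss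

def runA (names : List String)
    (st : PySem.Dict Int (List String) × List String × Option Int × Int) :
    List (Int × List String) :=
  let st' := names.foldl pvStepA st
  (if st'.2.1.isEmpty then st'.1 else st'.1.insert st'.2.2.2 st'.2.1).items

-- ---- the last-page helper: A's tokens-then-last equals B's scan-from-the-end ----

theorem takeWhile_append_cons_neg (p : Char → Bool) (c : Char) (l r : List Char)
    (hc : p c = false) : (l ++ c :: r).takeWhile p = l.takeWhile p := by
  induction l with
  | nil => simp [List.takeWhile_cons, hc]
  | cons a t ih => by_cases h : p a <;> simp [List.takeWhile_cons, h, ih]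

theorem dropWhile_all_neg (p : Char → Bool) (l : List Char)
    (h : ∀ x ∈ l, p x = false) : l.dropWhile p = l := by
  cases l with
  | nil => rfl
  | cons a t => simp [List.dropWhile_cons, h a (by simp)]

theorem takeWhile_all_pos (p : Char → Bool) (l : List Char)
    (h : ∀ x ∈ l, p x = true) : l.takeWhile p = l := by
  induction l with
  | nil => rfl
  | cons a t ih =>
    have ht := ih (fun x hx => h x (by simp [hx]))
    simp [List.takeWhile_cons, h a (by simp), ht]

theorem lastRun_all_digits (cur : List Char)
    (h : ∀ x ∈ cur, PySem.Str.isdigit x = true) : lastRun cur = cur := by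
  unfold lastRun
  rw [dropWhile_all_neg _ _ (fun x hx => by simp [h x (List.mem_reverse.mp hx)]),
      takeWhile_all_pos _ _ (fun x hx => h x (List.mem_reverse.mp hx)), List.reverse_reverse]

theorem lastRun_append_cons (cur : List Char) (c : Char) (cs : List Char)
    (hcur : ∀ x ∈ cur, PySem.Str.isdigit x = true) (hc : PySem.Str.isdigit c = false) :
    lastRun (cur ++ c :: cs) =
      if cs.any (fun x => PySem.Str.isdigit x) then lastRun cs else cur := by
  unfold lastRun
  rw [List.reverse_append, List.reverse_cons, List.append_assoc]
  by_cases h : cs.any (fun x => PySem.Str.isdigit x)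
  · simp only [h, if_true]
    have hne : cs.reverse.dropWhile (fun c => !(PySem.Str.isdigit c)) ≠ [] := by
      intro hnil
      rw [List.dropWhile_eq_nil_iff] at hnil
      rcases List.any_eq_true.mp h with ⟨x, hx, hdx⟩
      have := hnil x (List.mem_reverse.mpr hx)
      simp [hdx] at this
    rw [List.dropWhile_append]
    simp only [List.isEmpty_iff, hne, if_false]
    simp only [List.singleton_append]
    rw [takeWhile_append_cons_neg _ _ _ _ hc]
  · simp only [h, if_false]
    have hall : ∀ x ∈ cs.reverse, (fun c => !(PySem.Str.isdigit c)) x = true := by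
      intro x hx
      have : PySem.Str.isdigit x = false := by
        by_contra hfx
        exact h (List.any_eq_true.mpr ⟨x, List.mem_reverse.mp hx, by simpa using hfx⟩)
      simp [this]
    rw [List.dropWhile_append]
    have : cs.reverse.dropWhile (fun c => !(PySem.Str.isdigit c)) = [] := by
      rw [List.dropWhile_eq_nil_iff]; exact fun x hx => by simp [hall x hx]
    simp only [this, List.isEmpty_nil, if_true, List.singleton_append, List.dropWhile_cons]
    simp only [hc]
    simp only [Bool.not_false, if_true]
    rw [dropWhile_all_neg _ _ (fun x hx => by simp [hcur x (List.mem_reverse.mp hx)]),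
        takeWhile_all_pos _ _ (fun x hx => hcur x (List.mem_reverse.mp hx)),
        List.reverse_reverse]
    simp

theorem lastRun_nil_iff (l : List Char) :
    (lastRun l).isEmpty = !(l.any (fun c => PySem.Str.isdigit c)) := by
  unfold lastRun
  by_cases h : l.any (fun c => PySem.Str.isdigit c)
  · have hne : l.reverse.dropWhile (fun c => !(PySem.Str.isdigit c)) ≠ [] := by
      intro hnil
      rw [List.dropWhile_eq_nil_iff] at hnil
      rcases List.any_eq_true.mp h with ⟨x, hx, hdx⟩
      have := hnil x (List.mem_reverse.mpr hx)
      simp [hdx] at this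
    rcases hd : l.reverse.dropWhile (fun c => !(PySem.Str.isdigit c)) with _ | ⟨a, t⟩
    · exact absurd hd hne
    · have ha : PySem.Str.isdigit a = true := by
        have hw : l.reverse.dropWhile (fun c => !(PySem.Str.isdigit c)) ≠ [] := by
          rw [hd]; simp
        have := List.head_dropWhile_not (fun c => !(PySem.Str.isdigit c)) hw
        simp only [hd, List.head_cons] at this
        simpa using this
      simp [h, hd, List.takeWhile_cons, ha]
  · have : l.reverse.dropWhile (fun c => !(PySem.Str.isdigit c)) = [] := by
      rw [List.dropWhile_eq_nil_iff]
      intro x hx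
      have : PySem.Str.isdigit x = false := by
        by_contra hfx
        exact h (List.any_eq_true.mpr ⟨x, List.mem_reverse.mp hx, by simpa using hfx⟩)
      simp [this]
    simp [h, this]

theorem tokens_getLast (cs cur : List Char) (acc : List Int)
    (h : ∀ x ∈ cur, PySem.Str.isdigit x = true) :
    (pvTokensAux cs cur acc).getLast? =
      if cs.any (fun c => PySem.Str.isdigit c) || !cur.isEmpty then
        some (pvVal (lastRun (cur ++ cs)))
      else acc.getLast? := by
  induction cs generalizing cur acc with
  | nil =>
    rcases hcur : cur with _ | ⟨a, t⟩
    · simp [pvTokensAux]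
    · rw [← hcur]
      have hne : cur.isEmpty = false := by simp [hcur]
      have h1 : pvTokensAux [] cur acc = acc ++ [pvVal cur] := by
        simp [pvTokensAux, hne]
      rw [h1, List.getLast?_concat]
      simp only [List.any_nil, hne, Bool.not_false, Bool.false_or, if_true, List.append_nil]
      rw [lastRun_all_digits cur h]
  | cons c rest ih =>
    by_cases hd : PySem.Str.isdigit c
    · have step : pvTokensAux (c :: rest) cur acc = pvTokensAux rest (cur ++ [c]) acc := by
        simp [pvTokensAux, hd]
      rw [step, ih (cur ++ [c]) acc (by intro x hx; rcases List.mem_append.mp hx with h' | h'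
                                        · exact h x h'
                                        · simp at h'; subst h'; exact hd)]
      simp [hd, List.append_assoc]
    · have hc : PySem.Str.isdigit c = false := by simpa using hd
      rw [lastRun_append_cons cur c rest h hc]
      rcases hcur : cur with _ | ⟨a, t⟩
      · have step : pvTokensAux (c :: rest) [] acc = pvTokensAux rest [] acc := by
          simp [pvTokensAux, hc]
        rw [step, ih [] acc (by intro x hx; simp at hx)]
        by_cases hany : rest.any (fun c => PySem.Str.isdigit c) <;>
          simp [hany, hc]
      · rw [← hcur]
        have hne : cur.isEmpty = false := by simp [hcur]
        have step : pvTokensAux (c :: rest) cur acc = pvTokensAux rest [] (acc ++ [pvVal cur]) := by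
          simp [pvTokensAux, hc, hne]
        rw [step, ih [] (acc ++ [pvVal cur]) (by intro x hx; simp at hx)]
        by_cases hany : rest.any (fun c => PySem.Str.isdigit c)
        · simp [hany, hne]
        · simp only [hany, Bool.false_or, List.isEmpty_nil, Bool.not_true, if_false, hne,
            Bool.not_false, Bool.or_true, if_true]
          rw [List.getLast?_append]
          simp

-- A's page expression (tokens then last) equals B's _last_page
theorem pageA_eq (s : String) :
    (if (pvTokens s).isEmpty then none else PySem.List.pyGet? (pvTokens s) (-1)) =
      pvLastPage s := by
  have hlast : (pvTokens s).getLast? =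
      if s.toList.any (fun c => PySem.Str.isdigit c) then some (pvVal (lastRun s.toList))
      else none := by
    unfold pvTokens
    rw [tokens_getLast s.toList [] [] (by intro x hx; simp at hx)]
    by_cases hany : s.toList.any (fun c => PySem.Str.isdigit c) <;> simp [hany]
  have hrun : pvLastPage s =
      if s.toList.any (fun c => PySem.Str.isdigit c) then some (pvVal (lastRun s.toList))
      else none := by
    unfold pvLastPage
    have := lastRun_nil_iff s.toList
    by_cases hany : s.toList.any (fun c => PySem.Str.isdigit c)
    · rw [hany] at this; simp only [Bool.not_true] at this
      simp only [hany, if_true]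
      simp only [lastRun] at this ⊢
      rw [this]
      simp
    · rw [eq_false_of_ne_true hany] at this; simp only [Bool.not_false] at this
      simp only [eq_false_of_ne_true hany, if_false]
      simp only [lastRun] at this ⊢
      rw [this]
      simp
  rw [PySem.List.pyGet?_neg_one, hlast, hrun]
  by_cases hany : s.toList.any (fun c => PySem.Str.isdigit c)
  · have : (pvTokens s).getLast? = some (pvVal (lastRun s.toList)) := by rw [hlast]; simp [hany]
    have hne : (pvTokens s).isEmpty = false := by
      rcases ht : pvTokens s with _ | _
      · rw [ht] at this; simp at this
      · simp [ht]
    simp [hne, hany, this]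
  · have : (pvTokens s).getLast? = none := by rw [hlast]; simp [hany]
    have hnil : pvTokens s = [] := by
      rcases ht : pvTokens s with _ | ⟨a, t⟩
      · rfl
      · rw [ht] at this; simp [List.getLast?_concat] at this
    simp [hnil, hany]

-- ---- A-side: the stateful pass produces numbered segments ----

theorem runA_cons (f : String) (rest : List String)
    (st : PySem.Dict Int (List String) × List String × Option Int × Int) :
    runA (f :: rest) st = runA rest (pvStepA st f) := by
  simp [runA]

theorem runA_eq (names : List String) :
    ∀ (ch : PySem.Dict Int (List String)) (cur : List String) (lp : Option Int) (idx : Int),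
    (∀ k ∈ ch.keys, k < idx) →
    runA names (ch, cur, lp, idx) = ch.items ++ numberFrom idx (segs names lp cur) := by
  induction names with
  | nil =>
    intro ch cur lp idx hk
    unfold runA segs
    rcases hcur : cur with _ | ⟨a, t⟩
    · simp [numberFrom]
    · rw [← hcur]
      have hne : cur.isEmpty = false := by simp [hcur]
      simp only [List.foldl_nil, hne, Bool.false_eq_true, if_false]
      have hnc : ch.contains idx = false := by
        by_contra hcc
        have : idx ∈ ch.keys :=
          (PySem.Dict.contains_iff_mem_keys ch idx).mp (by simpa using hcc)
        exact absurd (hk idx this) (by omega)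
      rw [PySem.Dict.items_insert_of_not_contains ch cur hnc]
      simp [numberFrom]
  | cons f rest ih =>
    intro ch cur lp idx hk
    have hstep : pvStepA (ch, cur, lp, idx) f =
        (match lp, pvLastPage f with
         | some l, some p =>
           if p ≤ RESET_THRESHOLD ∧ l ≥ RESET_THRESHOLD + 3 then
             if (cur.length : Int) ≥ MIN_PAGES_CHAP then
               (ch.insert idx cur, [f], pvLastPage f, idx + 1)
             else (ch, cur ++ [f], pvLastPage f, idx)
           else (ch, cur ++ [f], pvLastPage f, idx)
         | _, _ => (ch, cur ++ [f], pvLastPage f, idx)) := by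
      simp only [pvStepA]
      rw [pageA_eq f]
      rcases lp with _ | l <;> rcases hpf : pvLastPage f with _ | p <;> simp [hpf]
      split_ifs <;> simp
    rw [runA_cons, hstep]
    rcases lp with _ | l <;> rcases hpf : pvLastPage f with _ | p <;> simp only [hpf]
    · rw [ih ch (cur ++ [f]) none idx hk]
      simp [segs, hpf]
    · rw [ih ch (cur ++ [f]) (some p) idx hk]
      simp [segs, hpf]
    · rw [ih ch (cur ++ [f]) none idx hk]
      simp [segs, hpf]
    · by_cases hcnd : p ≤ RESET_THRESHOLD ∧ l ≥ RESET_THRESHOLD + 3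
      · by_cases hlen : (cur.length : Int) ≥ MIN_PAGES_CHAP
        · rw [if_pos hcnd, if_pos hlen]
          have hk' : ∀ k ∈ (ch.insert idx cur).keys, k < idx + 1 := by
            intro k hkm
            rcases (PySem.Dict.mem_keys_insert ch idx k cur).mp hkm with h | h
            · omega
            · have := hk k h; omega
          rw [ih (ch.insert idx cur) [f] (some p) (idx + 1) hk']
          have hnc : ch.contains idx = false := by
            by_contra hcc
            have : idx ∈ ch.keys :=
              (PySem.Dict.contains_iff_mem_keys ch idx).mp (by simpa using hcc)
            exact absurd (hk idx this) (by omega)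
          rw [PySem.Dict.items_insert_of_not_contains ch cur hnc]
          simp [segs, hpf, hcnd, hlen, numberFrom]
        · rw [if_pos hcnd, if_neg hlen]
          rw [ih ch (cur ++ [f]) (some p) idx hk]
          simp [segs, hpf, hcnd, hlen]
      · rw [if_neg hcnd]
        rw [ih ch (cur ++ [f]) (some p) idx hk]
        simp [segs, hpf, hcnd]

-- ---- B-side scaffolding ----

theorem segLens_ne_nil (rest : List String) :
    ∀ (lp : Option Int) (cl : Int), segLens rest lp cl ≠ [] := by
  induction rest with
  | nil => intro lp cl; simp [segLens]
  | cons f r ih =>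
    intro lp cl
    unfold segLens
    rcases lp with _ | l <;> rcases pvLastPage f with _ | p <;> simp only []
    · exact ih _ _
    · exact ih _ _
    · exact ih _ _
    · split_ifs
      · simp
      · exact ih _ _

theorem presums_ne_nil (b : Int) (ls : List Int) (h : ls ≠ []) : presums b ls ≠ [] := by
  cases ls with
  | nil => exact absurd rfl h
  | cons a t => simp [presums]

theorem segLens_sum (rest : List String) :
    ∀ (lp : Option Int) (cl : Int), (segLens rest lp cl).sum = cl + rest.length := by
  induction rest with
  | nil => intro lp cl; simp [segLens]
  | cons f r ih =>
    intro lp cl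
    unfold segLens
    rcases lp with _ | l <;> rcases pvLastPage f with _ | p <;> simp only []
    · rw [ih]; push_cast [List.length_cons]; ring
    · rw [ih]; push_cast [List.length_cons]; ring
    · rw [ih]; push_cast [List.length_cons]; ring
    · split_ifs
      · simp only [List.sum_cons]; rw [ih]; push_cast [List.length_cons]; ring
      · rw [ih]; push_cast [List.length_cons]; ring

theorem getLastD_irrel (l : List Int) (d d' : Int) (h : l ≠ []) :
    l.getLastD d = l.getLastD d' := by
  cases l with
  | nil => exact absurd rfl h
  | cons a t => rw [List.getLastD_cons, List.getLastD_cons]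

theorem presums_getLast (ls : List Int) :
    ∀ (b : Int), ls ≠ [] → (presums b ls).getLastD 0 = b + ls.sum := by
  induction ls with
  | nil => intro b h; exact absurd rfl h
  | cons a t ih =>
    intro b _
    cases t with
    | nil => simp [presums]
    | cons c u =>
      have h1 := ih (b + a) (by simp)
      have h2 : (presums (b + a) (c :: u)).getLastD (b + a) =
          (presums (b + a) (c :: u)).getLastD 0 :=
        getLastD_irrel _ _ _ (presums_ne_nil _ _ (by simp))
      simp only [presums, List.sum_cons] at h1 h2 ⊢
      rw [List.getLastD_cons, h2, h1]
      ring

theorem dropLast_append_getLastD (l : List Int) (h : l ≠ []) :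
    l.dropLast ++ [l.getLastD 0] = l := by
  induction l with
  | nil => exact absurd rfl h
  | cons a t ih =>
    cases t with
    | nil => simp
    | cons c u =>
      rw [List.dropLast_cons_of_ne_nil (by simp), List.getLastD_cons]
      have h3 := ih (by simp)
      rw [getLastD_irrel _ 0 a (by simp)] at h3
      simp only [List.cons_append]
      rw [h3]

theorem segs_map_length (rest : List String) :
    ∀ (lp : Option Int) (cur : List String), cur ≠ [] →
    (segs rest lp cur).map (fun s => (s.length : Int)) = segLens rest lp (cur.length : Int) := by
  induction rest with
  | nil =>
    intro lp cur hc
    have hne : cur.isEmpty = false := by simpa [List.isEmpty_iff] using hc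
    simp [segs, segLens, hne]
  | cons f r ih =>
    intro lp cur hc
    have hlen1 : (((cur ++ [f]).length : Nat) : Int) = (cur.length : Int) + 1 := by
      simp [List.length_append]
    unfold segs segLens
    rcases lp with _ | l <;> rcases pvLastPage f with _ | p <;> simp only []
    · rw [ih _ _ (by simp), hlen1]
    · rw [ih _ _ (by simp), hlen1]
    · rw [ih _ _ (by simp), hlen1]
    · by_cases hcnd : p ≤ RESET_THRESHOLD ∧ l ≥ RESET_THRESHOLD + 3
      · by_cases hlen : (cur.length : Int) ≥ MIN_PAGES_CHAP
        · have hall : p ≤ RESET_THRESHOLD ∧ l ≥ RESET_THRESHOLD + 3 ∧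
              (cur.length : Int) ≥ MIN_PAGES_CHAP := ⟨hcnd.1, hcnd.2, hlen⟩
          rw [if_pos hcnd, if_pos hlen, if_pos hall, List.map_cons]
          rw [ih _ _ (by simp)]
          simp
        · have hall : ¬(p ≤ RESET_THRESHOLD ∧ l ≥ RESET_THRESHOLD + 3 ∧
              (cur.length : Int) ≥ MIN_PAGES_CHAP) := by tauto
          rw [if_pos hcnd, if_neg hlen, if_neg hall]
          rw [ih _ _ (by simp), hlen1]
      · have hall : ¬(p ≤ RESET_THRESHOLD ∧ l ≥ RESET_THRESHOLD + 3 ∧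
            (cur.length : Int) ≥ MIN_PAGES_CHAP) := by tauto
        rw [if_neg hcnd, if_neg hall]
        rw [ih _ _ (by simp), hlen1]

theorem segs_flatten (rest : List String) :
    ∀ (lp : Option Int) (cur : List String), (segs rest lp cur).flatten = cur ++ rest := by
  induction rest with
  | nil =>
    intro lp cur
    rcases hcur : cur with _ | ⟨a, t⟩ <;> simp [segs]
  | cons f r ih =>
    intro lp cur
    unfold segs
    rcases lp with _ | l <;> rcases pvLastPage f with _ | p <;> simp only []
    · rw [ih]; simp
    · rw [ih]; simp
    · rw [ih]; simp
    · split_ifs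
      · simp [ih]
      · rw [ih]; simp
      · rw [ih]; simp

theorem segs_ne_nil (rest : List String) :
    ∀ (lp : Option Int) (cur : List String), cur ≠ [] →
    ∀ s ∈ segs rest lp cur, s ≠ [] := by
  induction rest with
  | nil =>
    intro lp cur hc s hs
    have hne : cur.isEmpty = false := by simpa [List.isEmpty_iff] using hc
    simp [segs, hne] at hs
    subst hs; exact hc
  | cons f r ih =>
    intro lp cur hc s hs
    unfold segs at hs
    rcases hlp : lp with _ | l <;> rcases hpf : pvLastPage f with _ | p <;>
      simp only [hlp, hpf] at hs
    · exact ih _ _ (by simp) s hs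
    · exact ih _ _ (by simp) s hs
    · exact ih _ _ (by simp) s hs
    · split_ifs at hs
      · rcases List.mem_cons.mp hs with h | h
        · subst h; exact hc
        · exact ih _ _ (by simp) s h
      · exact ih _ _ (by simp) s hs
      · exact ih _ _ (by simp) s hs

-- the bounds fold is newB
theorem foldBounds (rest : List String) :
    ∀ (lp : Option Int) (i : Int) (bs : List Int) (b : Int), bs ≠ [] →
    PySem.List.pyGetD bs (-1) 0 = b →
    (PySem.List.enumerate ((lp :: rest.map pvLastPage).zip (rest.map pvLastPage)) i).foldl
        pvStepBounds bs = bs ++ newB rest lp i b := by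
  induction rest with
  | nil => intro lp i bs b _ _; simp [newB]
  | cons f r ih =>
    intro lp i bs b hbs hget
    simp only [List.map_cons, List.zip_cons_cons, PySem.List.enumerate_cons, List.foldl_cons]
    have hstep : pvStepBounds bs (i, lp, pvLastPage f) =
        (match lp, pvLastPage f with
         | some l, some p =>
           if p ≤ RESET_THRESHOLD ∧ l ≥ RESET_THRESHOLD + 3 ∧ i - b ≥ MIN_PAGES_CHAP then
             bs ++ [i]
           else bs
         | _, _ => bs) := by
      unfold pvStepBounds
      rcases lp with _ | l
      · rfl
      · rcases pvLastPage f with _ | p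
        · rfl
        · simp only [hget]
    rw [hstep]
    unfold newB
    rcases lp with _ | l <;> rcases hpf : pvLastPage f with _ | p <;> simp only [hpf]
    · exact ih _ _ bs b hbs hget
    · exact ih _ _ bs b hbs hget
    · exact ih _ _ bs b hbs hget
    · by_cases hcnd : p ≤ RESET_THRESHOLD ∧ l ≥ RESET_THRESHOLD + 3 ∧ i - b ≥ MIN_PAGES_CHAP
      · rw [if_pos hcnd, if_pos hcnd,
            ih _ _ (bs ++ [i]) i (by simp) (PySem.List.pyGetD_neg_one_append_singleton bs i 0)]
        simp
      · rw [if_neg hcnd, if_neg hcnd]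
        exact ih _ _ bs b hbs hget

-- newB is the partial sums of the segment lengths, without the total
theorem newB_presums (rest : List String) :
    ∀ (lp : Option Int) (i b : Int),
    newB rest lp i b = (presums b (segLens rest lp (i - b))).dropLast := by
  induction rest with
  | nil => intro lp i b; simp [newB, segLens, presums]
  | cons f r ih =>
    intro lp i b
    unfold newB segLens
    rcases lp with _ | l <;> rcases pvLastPage f with _ | p <;> simp only []
    · rw [ih, show i + 1 - b = i - b + 1 by ring]
    · rw [ih, show i + 1 - b = i - b + 1 by ring]
    · rw [ih, show i + 1 - b = i - b + 1 by ring]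
    · by_cases hcnd : p ≤ RESET_THRESHOLD ∧ l ≥ RESET_THRESHOLD + 3 ∧ i - b ≥ MIN_PAGES_CHAP
      · rw [if_pos hcnd, if_pos hcnd, ih, show i + 1 - i = (1 : Int) by ring]
        simp only [presums, show b + (i - b) = i by ring]
        rw [List.dropLast_cons_of_ne_nil
              (presums_ne_nil _ _ (segLens_ne_nil _ _ _))]
      · rw [if_neg hcnd, if_neg hcnd, ih, show i + 1 - b = i - b + 1 by ring]

-- slicing at the partial sums recovers the segments, numbered
theorem buildSlices (ss : List (List String)) :
    ∀ (k : Int) (acc : List (Int × List String)) (preL names : List String),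
    (∀ s ∈ ss, s ≠ []) → names = preL ++ ss.flatten →
    (PySem.List.enumerate
        ((((preL.length : Int)) :: presums (preL.length : Int) (ss.map fun s => (s.length : Int))).zip
          (presums (preL.length : Int) (ss.map fun s => (s.length : Int)))) k).foldl
      (pvStepBuild names) acc = acc ++ numberFrom k ss := by
  induction ss with
  | nil => intro k acc preL names _ _; simp [presums, numberFrom]
  | cons s ss' ih =>
    intro k acc preL names hne hn
    simp only [List.map_cons, presums, List.zip_cons_cons, PySem.List.enumerate_cons,
      List.foldl_cons]
    have hslen : 0 < s.length := List.length_pos_iff.mpr (hne s (by simp))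
    have hstep : pvStepBuild names acc
        (k, (preL.length : Int), (preL.length : Int) + (s.length : Int)) = acc ++ [(k, s)] := by
      unfold pvStepBuild
      have hlt : ((preL.length : Int)) < (preL.length : Int) + (s.length : Int) := by
        omega
      simp only [hlt, if_true]
      rw [PySem.List.slice_natCast_add]
      rw [hn, List.flatten_cons, List.drop_left, List.take_left]
    rw [hstep]
    have hlen' : ((preL.length : Int) + (s.length : Int)) = (((preL ++ s).length : Int)) := by
      push_cast [List.length_append]; ring
    rw [hlen']
    rw [ih (k + 1) (acc ++ [(k, s)]) (preL ++ s) names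
          (fun t ht => hne t (by simp [ht]))
          (by rw [hn, List.flatten_cons]; simp [List.append_assoc])]
    simp [numberFrom]

-- ---- the two main characterisations ----

theorem altB_eq (names : List String) :
    split_by_reset_py_alt names = numberFrom 1 (segs names none []) := by
  rcases names with _ | ⟨f, rest⟩
  · simp [split_by_reset_py_alt, segs, numberFrom, PySem.List.enumerate_cons, pvStepBuild,
      PySem.List.slice]
  · unfold split_by_reset_py_alt
    simp only [List.map_cons, PySem.List.slice_from_one, List.tail_cons]
    rw [foldBounds rest (pvLastPage f) 1 [0] 0 (by simp) (by simp [PySem.List.pyGetD]; rfl)]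
    have hsegs0 : segs (f :: rest) none [] = segs rest (pvLastPage f) [f] := by
      simp [segs]
    set L := segLens rest (pvLastPage f) 1 with hL
    have hnb : newB rest (pvLastPage f) 1 0 = (presums 0 L).dropLast := by
      rw [newB_presums, hL]; norm_num
    have hlast : (presums 0 L).getLastD 0 = ((f :: rest).length : Int) := by
      rw [presums_getLast L 0 (segLens_ne_nil _ _ _), hL, segLens_sum]
      push_cast [List.length_cons]; ring
    have hbounds : ([0] ++ newB rest (pvLastPage f) 1 0) ++ [((f :: rest).length : Int)] =
        0 :: presums 0 L := by
      rw [hnb, ← hlast]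
      simp only [List.singleton_append, List.cons_append]
      congr 1
      exact dropLast_append_getLastD _ (presums_ne_nil _ _ (segLens_ne_nil _ _ _))
    rw [hbounds]
    have hmap : L = (segs (f :: rest) none []).map (fun s => (s.length : Int)) := by
      rw [hsegs0, segs_map_length rest (pvLastPage f) [f] (by simp)]
      simp [hL]
    have h0 : (0 : Int) = ((([] : List String)).length : Int) := by simp
    rw [hmap, h0]
    simp only [List.tail_cons]
    rw [buildSlices (segs (f :: rest) none []) 1 [] [] (f :: rest)
          (by rw [hsegs0]; exact segs_ne_nil rest (pvLastPage f) [f] (by simp))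
          (by rw [segs_flatten]; simp)]
    simp

theorem mainA_eq (names : List String) :
    split_by_reset_py names = numberFrom 1 (segs names none []) := by
  have h : split_by_reset_py names = runA names (PySem.Dict.empty, [], none, 1) := rfl
  rw [h, runA_eq names PySem.Dict.empty [] none 1 (by simp [PySem.Dict.keys_empty])]
  simp [show (PySem.Dict.empty : PySem.Dict Int (List String)).items = ([] : List (Int × List String)) from rfl]

-- ===== VERDICT (by name: the statement is the Claim_ definition above) =====
theorem split_by_reset_py_spec : Claim_equal_split_by_reset_py := by
  intro names _
  unfold Spec_split_by_reset_py
  rw [mainA_eq, altB_eq]
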